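-- pv_equiv track=rewrite | github.com/suzingzzang/coding_test | Day02_250409/더맵게.py | solution
-- ===== SOURCE A (Python) =====
-- import heapq
--
-- def solution(scoville, K):
--     answer = 0
--     heap = []
--     for i in scoville:
--         heapq.heappush(heap,i)
--     while heap[0] < K :
--         x1 = heapq.heappop(heap)
--         x2 = heapq.heappop(heap)
--         new = x1 + x2*2
--         heapq.heappush(heap,new)
--         answer += 1
--         if len(heap) == 1 and heap[0] < K:
--             return -1
--     return answer
-- ===== SOURCE B (Python) =====
-- def solution(scoville, K):
--     lst = sorted(scoville)
--     answer = 0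
--     while lst[0] < K:
--         if len(lst) == 1:
--             return -1
--         new = lst[0] + lst[1] * 2
--         tail = lst[2:]
--         i = 0
--         while i < len(tail) and tail[i] < new:
--             i += 1
--         tail.insert(i, new)
--         lst = tail
--         answer += 1
--     return answer
-- ===== Notes on version B (the rewrite author's own statement) =====
-- stated objective: alternative
-- what changed: Replaces the binary heap with a single upfront sort plus a sorted list maintained by head-pops and an ordered reinsertion, checking the singleton case before popping instead of after mixing.
-- crash fix: On a one-element list whose only score is below K, A raises IndexError (second heappop from an empty heap) while B returns -1. — e.g. on solution([1], 5): A raises IndexError, B returns -1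
import Mathlib
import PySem

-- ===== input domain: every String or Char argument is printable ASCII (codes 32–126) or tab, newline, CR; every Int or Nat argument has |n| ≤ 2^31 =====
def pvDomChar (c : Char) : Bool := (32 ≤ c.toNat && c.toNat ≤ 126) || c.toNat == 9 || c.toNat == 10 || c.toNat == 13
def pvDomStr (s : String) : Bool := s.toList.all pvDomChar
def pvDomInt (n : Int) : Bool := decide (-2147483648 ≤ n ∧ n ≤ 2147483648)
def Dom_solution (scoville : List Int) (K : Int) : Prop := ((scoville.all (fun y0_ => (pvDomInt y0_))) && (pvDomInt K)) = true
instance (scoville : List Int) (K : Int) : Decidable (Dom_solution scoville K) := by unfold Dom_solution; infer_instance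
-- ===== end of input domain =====

-- B replaces A's binary heap with one upfront sort plus a sorted list (head-pops, ordered
-- reinsertion), checking the singleton case before popping instead of after mixing
-- (objective: alternative). Equivalence is about the RETURN value; neither side mutates
-- its argument observably.

-- ===== PORT A =====
-- heapq is a library call: it is ported by its contract — a heap is a multiset whose
-- top (heap[0]) is its minimum; heappush adds an element, heappop removes the minimum
-- (heapq surfaces the FIRST extremal element's value; on Int ties are identical values).
def pyHeapPush (h : List Int) (i : Int) : List Int := h ++ [i]

-- heappop: none = IndexError on an empty heap
def pyHeapPop (h : List Int) : Option (Int × List Int) :=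
  match PySem.List.min? h (fun v => v) with
  | none => none
  | some m => (PySem.List.remove? h m).map (fun r => (m, r))

theorem pyHeapPop_some {h : List Int} {m : Int} {r : List Int}
    (hp : pyHeapPop h = some (m, r)) : m ∈ h ∧ r = h.erase m ∧ r.length + 1 = h.length := by
  unfold pyHeapPop at hp
  cases hmin : PySem.List.min? h (fun v => v) with
  | none => rw [hmin] at hp; simp at hp
  | some m0 =>
    rw [hmin] at hp
    dsimp only at hp
    have hm0 : m0 ∈ h := PySem.List.min?_mem hmin
    rw [PySem.List.remove?_eq_some_erase h m0 hm0] at hp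
    simp at hp
    obtain ⟨hm, hr⟩ := hp
    subst hm
    rw [← hr]
    exact ⟨hm0, rfl, by
      rw [List.length_erase_of_mem hm0]
      have := List.length_pos_of_mem hm0
      omega⟩

-- the while loop of A: state (heap, answer); 0 is the junk value on the IndexError
-- branches (heap[0] of an empty heap / heappop from an empty heap), excluded by Pre_
def solutionLoop (heap : List Int) (K : Int) (answer : Int) : Int :=
  match PySem.List.min? heap (fun v => v) with
  | none => 0                                  -- heap[0]: IndexError
  | some top =>
    if top < K then
      match _h1 : pyHeapPop heap with
      | none => 0                              -- heappop: IndexError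
      | some (x1, r1) =>
        match _h2 : pyHeapPop r1 with
        | none => 0                            -- heappop: IndexError
        | some (x2, r2) =>
          if (pyHeapPush r2 (x1 + x2 * 2)).length = 1 ∧
              (PySem.List.min? (pyHeapPush r2 (x1 + x2 * 2)) (fun v => v)).getD 0 < K then -1
          else solutionLoop (pyHeapPush r2 (x1 + x2 * 2)) K (answer + 1)
    else answer
termination_by heap.length
decreasing_by
  have e1 := (pyHeapPop_some _h1).2.2
  have e2 := (pyHeapPop_some _h2).2.2
  simp [pyHeapPush]
  omega

def solution (scoville : List Int) (K : Int) : Int :=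
  solutionLoop (scoville.foldl pyHeapPush []) K 0

-- ===== PORT B =====
-- the inner while/insert of B: insert v before the first element ≥ v
def insSorted (v : Int) : List Int → List Int
  | [] => [v]
  | y :: ys => if y < v then y :: insSorted v ys else v :: y :: ys

theorem insSorted_perm (v : Int) (l : List Int) : (insSorted v l).Perm (v :: l) := by
  induction l with
  | nil => simp [insSorted]
  | cons y ys ih =>
    by_cases h : y < v
    · simp only [insSorted, if_pos h]
      exact (ih.cons y).trans (List.Perm.swap v y ys)
    · simp [insSorted, if_neg h]

theorem insSorted_length (v : Int) (l : List Int) : (insSorted v l).length = l.length + 1 :=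
  by simpa using (insSorted_perm v l).length_eq

-- the outer while loop of B: 0 is the junk value where lst[0] raises (empty list)
def solutionAltLoop (lst : List Int) (K : Int) (answer : Int) : Int :=
  match lst with
  | [] => 0                                    -- lst[0]: IndexError
  | x :: rest =>
    if x < K then
      match rest with
      | [] => -1
      | y :: rest2 => solutionAltLoop (insSorted (x + y * 2) rest2) K (answer + 1)
    else answer
termination_by lst.length
decreasing_by simp [insSorted_length]

def solution_alt (scoville : List Int) (K : Int) : Int :=
  solutionAltLoop (PySem.List.sorted scoville (fun v => v) false) K 0

-- ===== PRECONDITION & SPEC =====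
-- Pre_ excludes exactly the inputs where A raises IndexError: the empty list
-- (heap[0] of an empty heap) and a one-element list below K (second heappop from an
-- empty heap).
def Pre_solution (scoville : List Int) (K : Int) : Prop :=
  scoville ≠ [] ∧ (scoville.length = 1 → K ≤ scoville.headD 0)
instance (scoville : List Int) (K : Int) : Decidable (Pre_solution scoville K) := by
  unfold Pre_solution; infer_instance
def pvWitness_solution : List Int × Int := ([1, 2, 3, 9, 10, 12], 7)

-- On a one-element list whose only score is below K, A raises IndexError (second
-- heappop from an empty heap) while B returns -1 (it cannot be mixed above K).
def Raises_solution (scoville : List Int) (K : Int) : Prop :=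
  scoville.length = 1 ∧ scoville.headD 0 < K
instance (scoville : List Int) (K : Int) : Decidable (Raises_solution scoville K) := by
  unfold Raises_solution; infer_instance
def pvRaiseWitness_solution : List Int × Int := ([1], 5)
def pvRaiseWitnessOut_solution : Int := -1

def Spec_solution (scoville : List Int) (K : Int) (out : Int) : Prop := out = solution_alt scoville K
instance (scoville : List Int) (K : Int) (out : Int) : Decidable (Spec_solution scoville K out) := by unfold Spec_solution; infer_instance

-- ===== CLAIM (what is proved, stated in full; the proofs are below) =====
def Claim_equal_solution : Prop := ∀ (scoville : List Int) (K : Int), Dom_solution scoville K → Pre_solution scoville K → Spec_solution scoville K (solution scoville K)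
def Claim_raises_solution : Prop := (∀ (scoville : List Int) (K : Int), Dom_solution scoville K → Raises_solution scoville K → ¬ Pre_solution scoville K) ∧ (Dom_solution (pvRaiseWitness_solution.1) (pvRaiseWitness_solution.2) ∧ Raises_solution (pvRaiseWitness_solution.1) (pvRaiseWitness_solution.2) ∧ solution_alt (pvRaiseWitness_solution.1) (pvRaiseWitness_solution.2) = pvRaiseWitnessOut_solution)

-- ===== LEMMAS AND PROOFS =====

theorem min_of_perm_sorted {hA : List Int} {x : Int} {rest : List Int}
    (hp : hA.Perm (x :: rest)) (hs : (x :: rest).Pairwise (· ≤ ·)) :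
    PySem.List.min? hA (fun v => v) = some x := by
  cases hmin : PySem.List.min? hA (fun v => v) with
  | none =>
    have : hA = [] := (PySem.List.min?_eq_none_iff hA (fun v => v)).1 hmin
    subst this
    exact absurd hp.symm (by simp)
  | some m =>
    have hm : m ∈ hA := PySem.List.min?_mem hmin
    have hmem : m ∈ x :: rest := hp.mem_iff.1 hm
    have hxm : x ≤ m := by
      rcases List.mem_cons.1 hmem with h | h
      · omega
      · exact (List.pairwise_cons.1 hs).1 m h
    have hmx : m ≤ x := PySem.List.min?_isMin hmin x (hp.mem_iff.2 (by simp))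
    have : m = x := le_antisymm hmx hxm
    rw [this]

theorem insSorted_sorted {v : Int} {l : List Int} (hs : l.Pairwise (· ≤ ·)) :
    (insSorted v l).Pairwise (· ≤ ·) := by
  induction l with
  | nil => simp [insSorted]
  | cons y ys ih =>
    obtain ⟨hy, hys⟩ := List.pairwise_cons.1 hs
    by_cases h : y < v
    · simp only [insSorted, if_pos h]
      refine List.pairwise_cons.2 ⟨?_, ih hys⟩
      intro a ha
      have := (insSorted_perm v ys).mem_iff.1 ha
      rcases List.mem_cons.1 this with h' | h'
      · omega
      · exact hy a h'
    · simp only [insSorted, if_neg h]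
      refine List.pairwise_cons.2 ⟨?_, hs⟩
      intro a ha
      rcases List.mem_cons.1 ha with h' | h'
      · omega
      · exact le_trans (by omega) (hy a h')

-- the loop-level equivalence: A's heap state is any permutation of B's sorted list,
-- and whenever B's list is a singleton its element is ≥ K (A checks this before
-- re-entering the loop, B on entering it)
theorem loop_eq : ∀ (n : ℕ) (hA lB : List Int) (K answer : Int),
    lB.length = n → hA.Perm lB → lB.Pairwise (· ≤ ·) →
    (∀ v, lB = [v] → K ≤ v) →
    solutionLoop hA K answer = solutionAltLoop lB K answer := by
  intro n
  induction n using Nat.strong_induction_on with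
  | _ n ih =>
    intro hA lB K answer hlen hp hs hgood
    match lB with
    | [] =>
      have : hA = [] := hp.eq_nil
      subst this
      rw [solutionLoop.eq_def, solutionAltLoop.eq_def]
      simp [PySem.List.min?]
    | [x] =>
      -- singleton at loop entry: hgood says x ≥ K, both loops stop at once
      have hminA : PySem.List.min? hA (fun v => v) = some x := min_of_perm_sorted hp hs
      have hKx := hgood x rfl
      rw [solutionLoop.eq_def, solutionAltLoop.eq_def, hminA]
      have hxK : ¬ x < K := by omega
      simp [hxK]
    | x :: y :: rest2 =>
      have hminA : PySem.List.min? hA (fun v => v) = some x := min_of_perm_sorted hp hs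
      have hxmem : x ∈ hA := hp.mem_iff.2 (by simp)
      have hpop1 : pyHeapPop hA = some (x, hA.erase x) := by
        unfold pyHeapPop
        rw [hminA]
        dsimp only
        rw [PySem.List.remove?_eq_some_erase hA x hxmem]; rfl
      have hperm1 : (hA.erase x).Perm (y :: rest2) := by
        have := hp.erase x
        simpa using this
      have hs' : (y :: rest2).Pairwise (· ≤ ·) := (List.pairwise_cons.1 hs).2
      have hminA2 : PySem.List.min? (hA.erase x) (fun v => v) = some y :=
        min_of_perm_sorted hperm1 hs'
      have hymem : y ∈ hA.erase x := hperm1.mem_iff.2 (by simp)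
      have hpop2 : pyHeapPop (hA.erase x) = some (y, (hA.erase x).erase y) := by
        unfold pyHeapPop
        rw [hminA2]
        dsimp only
        rw [PySem.List.remove?_eq_some_erase (hA.erase x) y hymem]; rfl
      have hperm2 : ((hA.erase x).erase y).Perm rest2 := by
        have := hperm1.erase y
        simpa using this
      rw [solutionLoop.eq_def, solutionAltLoop.eq_def, hminA]
      by_cases hxK : x < K
      · simp only [if_pos hxK]
        -- reduce A's two heappop matches against hpop1, hpop2
        split
        · rename_i heq; rw [hpop1] at heq; simp at heq
        · rename_i x1 r1 heq
          rw [hpop1] at heq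
          injection heq with heq
          injection heq with hx1 hr1
          subst hx1; subst hr1
          split
          · rename_i heq2; rw [hpop2] at heq2; simp at heq2
          · rename_i x2 r2 heq2
            rw [hpop2] at heq2
            injection heq2 with heq2
            injection heq2 with hx2 hr2
            subst hx2; subst hr2
            have hpermH : (pyHeapPush ((hA.erase x).erase y) (x + y * 2)).Perm
                (insSorted (x + y * 2) rest2) := by
              have hcons : (pyHeapPush ((hA.erase x).erase y) (x + y * 2)).Perm
                  ((x + y * 2) :: (hA.erase x).erase y) := by
                simp [pyHeapPush, List.perm_append_singleton]
              exact hcons.trans ((hperm2.cons _).trans (insSorted_perm _ rest2).symm)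
            have hsort' : (insSorted (x + y * 2) rest2).Pairwise (· ≤ ·) :=
              insSorted_sorted (List.pairwise_cons.1 hs').2
            split_ifs with hone
            · -- A returns -1; B's next iteration sees the singleton [x+y*2] below K
              obtain ⟨hlen1, hmlt⟩ := hone
              have hr2nil : rest2 = [] := by
                have hlp := hpermH.length_eq
                rw [insSorted_length] at hlp
                have : rest2.length = 0 := by omega
                exact List.length_eq_zero_iff.1 this
              subst hr2nil
              have heq1 : pyHeapPush ((hA.erase x).erase y) (x + y * 2) = [x + y * 2] :=
                List.perm_singleton.1 (by simpa [insSorted] using hpermH)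
              have hnwK : x + y * 2 < K := by
                rw [heq1] at hmlt
                simpa [PySem.List.min?] using hmlt
              rw [show insSorted (x + y * 2) [] = [x + y * 2] from rfl]
              rw [solutionAltLoop.eq_def]
              simp [hnwK]
            · -- both recurse in lockstep
              refine ih (insSorted (x + y * 2) rest2).length ?_ _ _ K (answer + 1)
                rfl hpermH hsort' ?_
              · rw [insSorted_length]; simp at hlen ⊢; omega
              · intro v hv
                rw [hv] at hpermH
                have heq1 : pyHeapPush ((hA.erase x).erase y) (x + y * 2) = [v] :=
                  List.perm_singleton.1 hpermH
                have hvnw : x + y * 2 = v := by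
                  have hmem : (x + y * 2) ∈ ([v] : List Int) := by
                    rw [← hv]
                    exact (insSorted_perm _ rest2).mem_iff.2 (by simp)
                  simpa using hmem
                by_contra hKv
                exact hone ⟨by rw [heq1]; rfl,
                  by rw [heq1]; simp [PySem.List.min?]; omega⟩
      · simp [if_neg hxK]

theorem foldl_pyHeapPush (xs acc : List Int) : xs.foldl pyHeapPush acc = acc ++ xs := by
  induction xs generalizing acc with
  | nil => simp
  | cons x xs ih => simp [pyHeapPush, ih]

-- ===== VERDICT (by name: the statement is the Claim_ definition above) =====
theorem solution_spec : Claim_equal_solution := by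
  intro scoville K _ hpre
  obtain ⟨hne, hone⟩ := hpre
  unfold Spec_solution solution solution_alt
  rw [foldl_pyHeapPush]
  simp only [List.nil_append]
  apply loop_eq (PySem.List.sorted scoville (fun v => v) false).length _ _ K 0 rfl
  · exact (PySem.List.sorted_perm scoville (fun v => v) false).symm
  · exact PySem.List.sorted_pairwise scoville (fun v => v)
  · intro v hv
    have hperm := PySem.List.sorted_perm scoville (fun v => v) false
    rw [hv] at hperm
    have hsc : scoville = [v] := (List.perm_singleton.1 hperm.symm)
    have := hone (by rw [hsc]; rfl)
    rw [hsc] at this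
    simpa using this

@[simp] theorem solution_raises : Claim_raises_solution := by
  unfold Claim_raises_solution
  constructor
  · intro scoville K _ hR hpre
    obtain ⟨h1, h2⟩ := hR
    obtain ⟨_, hp⟩ := hpre
    have := hp h1
    omega
  · refine ⟨by decide, by decide, ?_⟩
    show solution_alt [1] 5 = -1
    unfold solution_alt
    change solutionAltLoop [1] 5 0 = -1
    rw [solutionAltLoop.eq_def]
    norm_num
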